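-- pv_equiv track=rewrite | github.com/christianebacani/Roadmap | Coding Challenges using Python and SQL/CodeForces Pyton Solved Problems/A Category/540A_combination_lock.py | forward_move
-- ===== SOURCE A (Python) =====
-- def forward_move(digit: int, target_digit: int) -> int:
--     total = 0
--
--     while digit != target_digit:
--         if digit == 9:
--             digit = 0
--             total += 1
--
--         else:
--             digit += 1
--             total += 1
--
--     return total
-- ===== SOURCE B (Python) =====
-- def forward_move(digit: int, target_digit: int) -> int:
--     # Closed form: straight distance when counting up never wraps,
--     # otherwise the distance with one wrap through 9 -> 0.
--     if target_digit >= digit: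
--         return target_digit - digit
--     return 10 - digit + target_digit
-- ===== Notes on version B (the rewrite author's own statement) =====
-- stated objective: simpler
-- what changed: The while-loop counting single increments is replaced by a two-case closed-form expression: the straight distance, or the distance with one wrap through 9->0.
import Mathlib
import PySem

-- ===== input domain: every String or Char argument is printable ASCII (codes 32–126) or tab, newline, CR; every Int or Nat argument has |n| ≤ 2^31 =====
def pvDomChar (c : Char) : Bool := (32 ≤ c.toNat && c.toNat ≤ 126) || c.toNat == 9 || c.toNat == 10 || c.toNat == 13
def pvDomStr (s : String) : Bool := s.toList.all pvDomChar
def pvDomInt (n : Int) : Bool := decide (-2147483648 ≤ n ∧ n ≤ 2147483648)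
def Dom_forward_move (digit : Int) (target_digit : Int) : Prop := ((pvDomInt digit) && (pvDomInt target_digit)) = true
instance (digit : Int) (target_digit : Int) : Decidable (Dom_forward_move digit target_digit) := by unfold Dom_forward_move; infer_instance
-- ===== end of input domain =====

-- B replaces A's step-by-step increment loop with the closed-form distance
-- (straight difference, or one wrap through 9 -> 0) for simplicity; A's loop
-- diverges outside Pre_forward_move, so the claim covers the inputs where A returns.


-- ===== PORT A =====
-- A's while-loop, made total with a fuel guard; on every input of Pre_forward_move
-- the fuel below strictly exceeds the number of loop iterations, so the guard
-- never fires there and the port computes exactly what A computes.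
def fmLoopA (digit target_digit total : Int) (fuel : Nat) : Int :=
  match fuel with
  | 0 => total
  | n + 1 =>
      if digit = target_digit then total
      else if digit = 9 then fmLoopA 0 target_digit (total + 1) n
      else fmLoopA (digit + 1) target_digit (total + 1) n

def forward_move (digit : Int) (target_digit : Int) : Int :=
  fmLoopA digit target_digit 0 ((target_digit - digit).toNat + 20)

-- ===== PORT B =====
def forward_move_alt (digit : Int) (target_digit : Int) : Int :=
  if target_digit ≥ digit then target_digit - digit
  else 10 - digit + target_digit

-- ===== PRECONDITION & SPEC =====
-- Pre_ is exactly the set of inputs on which A's while-loop terminates (anywhere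
-- else A diverges and returns nothing): either the target is reached by counting
-- straight up without passing 9 (digit ≤ target ≤ 9, or digit > 9 so the reset
-- branch never fires), or the count wraps once through 9 -> 0 (0 ≤ target < digit ≤ 9).
def Pre_forward_move (digit : Int) (target_digit : Int) : Prop :=
  digit = target_digit ∨
  (digit < target_digit ∧ (target_digit ≤ 9 ∨ 9 < digit)) ∨
  (target_digit < digit ∧ 0 ≤ target_digit ∧ digit ≤ 9)
instance (digit : Int) (target_digit : Int) : Decidable (Pre_forward_move digit target_digit) := by unfold Pre_forward_move; infer_instance

def pvWitness_forward_move : Int × Int := (7, 2)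

def Spec_forward_move (digit : Int) (target_digit : Int) (out : Int) : Prop := out = forward_move_alt digit target_digit
instance (digit : Int) (target_digit : Int) (out : Int) : Decidable (Spec_forward_move digit target_digit out) := by unfold Spec_forward_move; infer_instance

-- ===== CLAIM (what is proved, stated in full; the proofs are below) =====
def Claim_equal_forward_move : Prop := ∀ (digit : Int) (target_digit : Int), Dom_forward_move digit target_digit → Pre_forward_move digit target_digit → Spec_forward_move digit target_digit (forward_move digit target_digit)

-- ===== LEMMAS AND PROOFS =====

-- Loop invariant: under Pre_ with enough fuel, the loop adds exactly the
-- closed-form distance to the accumulator.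
theorem fmLoopA_eq (fuel : Nat) : ∀ (d t total : Int),
    Pre_forward_move d t → forward_move_alt d t ≤ (fuel : Int) →
    fmLoopA d t total fuel = total + forward_move_alt d t := by
  induction fuel with
  | zero =>
      intro d t total hp hf
      have : forward_move_alt d t = 0 := by
        unfold forward_move_alt at hf ⊢
        unfold Pre_forward_move at hp
        split_ifs with h <;> split_ifs at hf <;> omega
      simp [fmLoopA, this]
  | succ n ih =>
      intro d t total hp hf
      unfold Pre_forward_move at hp
      by_cases hdt : d = t
      · have h0 : forward_move_alt d t = 0 := by unfold forward_move_alt; split_ifs <;> omega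
        subst hdt; simp [fmLoopA, h0]
      · by_cases h9 : d = 9
        · -- d = 9 ≠ t; Pre_ forces 0 ≤ t < 9, the wrap step
          have ht : 0 ≤ t ∧ t < 9 := by omega
          have hp0 : Pre_forward_move 0 t := by unfold Pre_forward_move; omega
          have hb : forward_move_alt d t = 1 + forward_move_alt 0 t := by
            unfold forward_move_alt; split_ifs <;> omega
          have hf0 : forward_move_alt 0 t ≤ (n : Int) := by
            rw [hb] at hf; push_cast at hf ⊢; omega
          simp only [fmLoopA, if_neg hdt, if_pos h9]
          rw [ih 0 t (total + 1) hp0 hf0, hb]; ring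
        · -- plain increment step
          have hp1 : Pre_forward_move (d + 1) t := by unfold Pre_forward_move; omega
          have hb : forward_move_alt d t = 1 + forward_move_alt (d + 1) t := by
            unfold forward_move_alt; split_ifs <;> omega
          have hf1 : forward_move_alt (d + 1) t ≤ (n : Int) := by
            rw [hb] at hf; push_cast at hf ⊢; omega
          simp only [fmLoopA, if_neg hdt, if_neg h9]
          rw [ih (d + 1) t (total + 1) hp1 hf1, hb]; ring

-- ===== VERDICT (by name: the statement is the Claim_ definition above) =====
theorem forward_move_spec : Claim_equal_forward_move := by
  intro d t _ hp
  unfold Spec_forward_move forward_move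
  have hf : forward_move_alt d t ≤ (((t - d).toNat + 20 : Nat) : Int) := by
    unfold forward_move_alt
    unfold Pre_forward_move at hp
    split_ifs <;> push_cast <;> omega
  rw [fmLoopA_eq _ d t 0 hp hf]; ring
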